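-- pv_equiv track=rewrite | github.com/Ian-Carneiro/programas_SGD | atividade2/atividade_seguranca2.py | formarMatrizParaEncript
-- ===== SOURCE A (Python) =====
-- def formarMatrizParaEncript(m, chave):
--     m = chave + m.replace(" ", "")
--     palavra = []
--     matriz = []
--     tamanhoChave = len(chave)
--     tamanhoM = len(m)
--
--     while tamanhoM % tamanhoChave!=0:
--         m+=" "
--         tamanhoM = len(m)
--
--     for i in range(tamanhoChave):
--         for j in range(int(tamanhoM / tamanhoChave)):
--             palavra.append(m[j * tamanhoChave + i]) # j * tamanhoChave + i = calculo para simular uma matriz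
--
--         matriz.append(palavra)
--         palavra = []
--
--     return matriz
-- ===== SOURCE B (Python) =====
-- def formarMatrizParaEncript(m, chave):
--     s = chave + m.replace(" ", "")
--     s += " " * (-len(s) % len(chave))
--     rows = []
--     while s:
--         rows.append(s[:len(chave)])
--         s = s[len(chave):]
--     return [list(col) for col in zip(*rows)]
-- ===== Notes on version B (the rewrite author's own statement) =====
-- stated objective: faster
-- what changed: B replaces A's manual padding while-loop and the per-character column-major index formula (m[j*k+i] in nested counted loops) with arithmetic padding ((-len) % k), chunking the string into rows, and transposing with zip(*rows).
import Mathlib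
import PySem

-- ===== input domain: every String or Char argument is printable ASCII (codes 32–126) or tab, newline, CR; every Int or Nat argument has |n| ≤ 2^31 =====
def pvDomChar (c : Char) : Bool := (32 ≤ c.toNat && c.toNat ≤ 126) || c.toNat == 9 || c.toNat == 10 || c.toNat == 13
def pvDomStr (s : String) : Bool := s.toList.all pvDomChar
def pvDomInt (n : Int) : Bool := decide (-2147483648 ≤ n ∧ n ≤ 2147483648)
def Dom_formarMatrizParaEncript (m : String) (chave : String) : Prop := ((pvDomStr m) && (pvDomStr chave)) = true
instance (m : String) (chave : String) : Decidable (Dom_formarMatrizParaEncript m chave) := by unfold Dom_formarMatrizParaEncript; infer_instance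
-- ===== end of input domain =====

-- B builds the padded string by arithmetic ((-len) % k), chunks it into rows and transposes
-- with zip(*rows), instead of A's padding while-loop and direct column-major index formula.
-- Objective: idiomatic. Pre_ excludes chave = "", where both Pythons raise ZeroDivisionError.

-- ===== PORT A =====
-- the 'while tamanhoM % tamanhoChave != 0: m += " "' loop (the k = 0 guard is only for
-- totality; Python raises ZeroDivisionError there, excluded by Pre_)
def padA (s : List Char) (k : Nat) : List Char :=
  if k = 0 ∨ s.length % k = 0 then s else padA (s ++ [' ']) k
termination_by (k - s.length % k) % k
decreasing_by
  rename_i h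
  simp only [not_or] at h
  obtain ⟨hk0, hr⟩ := h
  have hk : 0 < k := Nat.pos_of_ne_zero hk0
  have hk2 : 1 < k := by
    rcases k with _ | _ | k
    · omega
    · exact absurd (Nat.mod_one s.length) hr
    · omega
  have hlt : s.length % k < k := Nat.mod_lt _ hk
  have h1 : ((s ++ [' ']).length) % k = (s.length % k + 1) % k := by
    simp only [List.length_append, List.length_cons, List.length_nil, Nat.zero_add]
    rw [Nat.add_mod, Nat.mod_eq_of_lt hk2]
  rw [h1]
  by_cases hc : s.length % k = k - 1
  · have h2 : (s.length % k + 1) % k = 0 := by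
      rw [show s.length % k + 1 = k by omega, Nat.mod_self]
    rw [h2, Nat.sub_zero, Nat.mod_self, Nat.mod_eq_of_lt (by omega : k - s.length % k < k)]
    omega
  · have h2 : (s.length % k + 1) % k = s.length % k + 1 := Nat.mod_eq_of_lt (by omega)
    rw [h2, Nat.mod_eq_of_lt (by omega : k - (s.length % k + 1) < k),
        Nat.mod_eq_of_lt (by omega : k - s.length % k < k)]
    omega

def formarMatrizParaEncript (m : String) (chave : String) : List (List String) :=
  let k := chave.toList.length
  let s := padA (chave.toList ++ (PySem.Str.replace m " " "").toList) k
  -- int(tamanhoM / tamanhoChave): k divides s.length after the loop, so Nat division is exact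
  (List.range k).map (fun i =>
    (List.range (s.length / k)).map (fun j => String.ofList [(s[j * k + i]?).getD ' ']))

-- ===== PORT B =====
-- the 'while s: rows.append(s[:k]); s = s[k:]' loop (k = 0 guard only for totality; Python B
-- raises ZeroDivisionError before reaching it when chave = "")
def chunksB (s : List Char) (k : Nat) : List (List Char) :=
  if k = 0 ∨ s = [] then [] else s.take k :: chunksB (s.drop k) k
termination_by s.length
decreasing_by
  rename_i h
  simp only [not_or] at h
  have hs : 0 < s.length := List.length_pos_iff.mpr h.2
  simp only [List.length_drop]
  omega

-- zip(*rows): stops at the shortest row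
def transpB (rows : List (List Char)) : List (List Char) :=
  if _h : rows ≠ [] ∧ rows.all (fun r => !r.isEmpty) then
    rows.map (fun r => r.headD ' ') :: transpB (rows.map (fun r => r.tail))
  else []
termination_by (rows.headD []).length
decreasing_by
  rcases rows with _ | ⟨r, rs⟩
  · exact absurd rfl _h.1
  · have h2 := _h.2
    simp only [List.all_cons, Bool.and_eq_true, Bool.not_eq_true', List.isEmpty_eq_false_iff] at h2
    have hr : r ≠ [] := h2.1
    have : 0 < r.length := List.length_pos_iff.mpr hr
    simp only [List.attach_cons, List.map_cons, List.map_map, List.headD_cons,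
      List.length_tail]
    omega

def formarMatrizParaEncript_alt (m : String) (chave : String) : List (List String) :=
  -- m appears in s0 below
  let k := chave.toList.length
  let s0 := chave.toList ++ (PySem.Str.replace m " " "").toList
  let s := s0 ++ List.replicate ((PySem.Int.mod (-(s0.length : Int)) (k : Int)).toNat) ' '
  (transpB (chunksB s k)).map (fun col => col.map (fun c => String.ofList [c]))

-- ===== PRECONDITION & SPEC =====
-- Pre_ excludes exactly chave = "", where Python A raises ZeroDivisionError at 'tamanhoM % tamanhoChave' (B raises it too).
def Pre_formarMatrizParaEncript (m : String) (chave : String) : Prop := chave ≠ ""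
instance (m : String) (chave : String) : Decidable (Pre_formarMatrizParaEncript m chave) := by
  unfold Pre_formarMatrizParaEncript; infer_instance

def pvWitness_formarMatrizParaEncript : String × String := ("hello world", "ab")

def Spec_formarMatrizParaEncript (m : String) (chave : String) (out : List (List String)) : Prop := out = formarMatrizParaEncript_alt m chave
instance (m : String) (chave : String) (out : List (List String)) : Decidable (Spec_formarMatrizParaEncript m chave out) := by unfold Spec_formarMatrizParaEncript; infer_instance

-- ===== CLAIM (what is proved, stated in full; the proofs are below) =====
def Claim_equal_formarMatrizParaEncript : Prop := ∀ (m : String) (chave : String), Dom_formarMatrizParaEncript m chave → Pre_formarMatrizParaEncript m chave → Spec_formarMatrizParaEncript m chave (formarMatrizParaEncript m chave)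

-- ===== LEMMAS AND PROOFS =====

-- A's padding loop appends exactly (k - len % k) % k blanks
theorem padA_eq (c : Nat) : ∀ (s : List Char) (k : Nat), 0 < k →
    (k - s.length % k) % k = c → padA s k = s ++ List.replicate c ' ' := by
  induction c with
  | zero =>
    intro s k hk hc
    have hr : s.length % k = 0 := by
      have := Nat.mod_lt s.length hk
      by_contra h0
      rw [Nat.mod_eq_of_lt (by omega : k - s.length % k < k)] at hc
      omega
    rw [padA]
    simp [hr]
  | succ n ih =>
    intro s k hk hc
    have hlt : s.length % k < k := Nat.mod_lt _ hk
    have hr : s.length % k ≠ 0 := by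
      intro h0; rw [h0, Nat.sub_zero, Nat.mod_self] at hc; omega
    rw [padA, if_neg (by omega : ¬ (k = 0 ∨ s.length % k = 0))]
    have hk2 : 1 < k := by
      rcases k with _ | _ | k
      · omega
      · exact absurd (Nat.mod_one s.length) hr
      · omega
    have h1 : ((s ++ [' ']).length) % k = (s.length % k + 1) % k := by
      simp only [List.length_append, List.length_cons, List.length_nil, Nat.zero_add]
      rw [Nat.add_mod, Nat.mod_eq_of_lt hk2]
    have hc' : (k - (s ++ [' ']).length % k) % k = n := by
      rw [h1]
      rw [Nat.mod_eq_of_lt (by omega : k - s.length % k < k)] at hc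
      by_cases hcc : s.length % k = k - 1
      · rw [show s.length % k + 1 = k by omega, Nat.mod_self, Nat.sub_zero, Nat.mod_self]
        omega
      · rw [Nat.mod_eq_of_lt (by omega : s.length % k + 1 < k),
            Nat.mod_eq_of_lt (by omega : k - (s.length % k + 1) < k)]
        omega
    rw [ih (s ++ [' ']) k hk hc']
    simp [List.replicate_succ]

-- B's pad count equals A's
theorem bpad_eq (n k : Nat) (hk : 0 < k) :
    (PySem.Int.mod (-(n : Int)) (k : Int)).toNat = (k - n % k) % k := by
  rw [PySem.Int.mod_eq_emod_of_pos (by exact_mod_cast hk)]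
  have hr : n % k < k := Nat.mod_lt _ hk
  have key : (-(n : Int)) % k = (-((n % k : Nat) : Int)) % k := by
    conv_lhs => rw [show -(n : Int) = -((n % k : Nat) : Int) + (-((n / k : Nat) : Int)) * k by
      have h := Nat.div_add_mod n k
      push_cast
      have h' : (k : Int) * ((n / k : Nat) : Int) + ((n % k : Nat) : Int) = (n : Int) := by
        exact_mod_cast h
      push_cast at h'
      linarith]
    rw [Int.add_mul_emod_self_right]
  rcases Nat.eq_zero_or_pos (n % k) with h | h
  · rw [key, h]
    simp [Nat.mod_self]
  · have h2 : (-((n % k : Nat) : Int)) % k = ((k - n % k : Nat) : Int) := by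
      conv_lhs => rw [show (-((n % k : Nat) : Int)) = ((k - n % k : Nat) : Int) + (-1) * k by
        push_cast [Nat.le_of_lt hr]; ring]
      rw [Int.add_mul_emod_self_right]
      exact Int.emod_eq_of_lt (Int.natCast_nonneg _) (by push_cast [Nat.le_of_lt hr]; omega)
    rw [key, h2, Int.toNat_natCast]
    exact (Nat.mod_eq_of_lt (by omega)).symm

-- chunksB on a string of length q*k is the list of its q consecutive k-blocks
theorem chunksB_spec (k : Nat) (hk : 0 < k) : ∀ (q : Nat) (s : List Char), s.length = q * k →
    chunksB s k = (List.range q).map (fun j => (s.drop (j * k)).take k) := by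
  intro q
  induction q with
  | zero =>
    intro s hs
    have : s = [] := List.eq_nil_of_length_eq_zero (by omega)
    subst this
    rw [chunksB]
    simp
  | succ n ih =>
    intro s hs
    have hne : s ≠ [] := by
      intro h; subst h; simp at hs; omega
    rw [chunksB, if_neg (fun hcon => hcon.elim (fun h0 => absurd h0 (by omega)) hne)]
    rw [ih (s.drop k) (by simp only [List.length_drop, hs]; ring_nf; omega)]
    rw [List.range_succ_eq_map]
    simp only [List.map_cons, List.map_map, Nat.zero_mul, List.drop_zero]
    congr 1
    apply List.map_congr_left
    intro j hj
    simp only [Function.comp_apply, List.drop_drop]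
    congr 2
    simp [Nat.succ_mul]
    omega

theorem transpB_spec : ∀ (kk : Nat) (rows : List (List Char)), rows ≠ [] →
    (∀ r ∈ rows, r.length = kk) →
    transpB rows = (List.range kk).map (fun i => rows.map (fun r => (r[i]?).getD ' ')) := by
  intro kk
  induction kk with
  | zero =>
    intro rows hne hall
    rw [transpB, dif_neg]
    · simp
    · rintro ⟨h1, h2⟩
      rcases rows with _ | ⟨r, rs⟩
      · exact hne rfl
      · have hr0 : r = [] := List.eq_nil_of_length_eq_zero (hall r (by simp))
        simp [hr0] at h2
  | succ n ih =>
    intro rows hne hall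
    have hcond : rows ≠ [] ∧ rows.all (fun r => !r.isEmpty) := by
      refine ⟨hne, ?_⟩
      rw [List.all_eq_true]
      intro r hr
      have := hall r hr
      simp only [Bool.not_eq_true', List.isEmpty_eq_false_iff]
      intro h0; rw [h0] at this; simp at this
    rw [transpB, dif_pos hcond]
    have hmapne : rows.map (fun r => r.tail) ≠ [] := by simp [hne]
    have hmaplen : ∀ r ∈ rows.map (fun r => r.tail), r.length = n := by
      intro r hr
      rcases List.mem_map.mp hr with ⟨t, ht, rfl⟩
      have := hall t ht
      simp [List.length_tail, this]
    rw [ih _ hmapne hmaplen]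
    rw [List.range_succ_eq_map]
    simp only [List.map_cons, List.map_map]
    congr 1
    · apply List.map_congr_left
      intro r hr
      have := hall r hr
      rcases r with _ | ⟨a, t⟩
      · simp at this
      · simp
    · apply List.map_congr_left
      intro i _
      simp only [Function.comp_apply]
      apply List.map_congr_left
      intro r _
      simp only [Function.comp_apply]
      rw [← List.drop_one, List.getElem?_drop, Nat.add_comm]

-- ===== VERDICT (by name: the statement is the Claim_ definition above) =====
theorem formarMatrizParaEncript_spec : Claim_equal_formarMatrizParaEncript := by
  intro m chave _ hpre
  unfold Spec_formarMatrizParaEncript formarMatrizParaEncript formarMatrizParaEncript_alt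
  dsimp only
  have hpre' : chave ≠ "" := hpre
  have hch : chave.toList ≠ [] := by simp_all
  have hk : 0 < chave.toList.length := List.length_pos_iff.mpr hch
  set k := chave.toList.length with hkdef
  set s0 := chave.toList ++ (PySem.Str.replace m " " "").toList with hs0def
  have hs0 : k ≤ s0.length := by
    simp only [hs0def, List.length_append, hkdef]
    exact Nat.le_add_right _ _
  set c := (k - s0.length % k) % k with hcdef
  rw [padA_eq c s0 k hk rfl, bpad_eq s0.length k hk, ← hcdef]
  set s := s0 ++ List.replicate c ' ' with hsdef
  have hclt : c < k := by rw [hcdef]; exact Nat.mod_lt _ hk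
  have hslen : s.length = s0.length + c := by simp [hsdef]
  have hmod : s.length % k = 0 := by
    rw [hslen, Nat.add_mod]
    rcases Nat.eq_zero_or_pos (s0.length % k) with h | h
    · have : c = 0 := by rw [hcdef, h, Nat.sub_zero, Nat.mod_self]
      simp [h, this]
    · have hsr : s0.length % k < k := Nat.mod_lt _ hk
      have hc : c = k - s0.length % k := by
        rw [hcdef]; exact Nat.mod_eq_of_lt (by omega)
      rw [Nat.mod_eq_of_lt hclt, show s0.length % k + c = k by omega, Nat.mod_self]
  set q := s.length / k with hqdef
  have hqk : s.length = q * k := by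
    rw [hqdef, Nat.div_mul_cancel (Nat.dvd_of_mod_eq_zero hmod)]
  have hq1 : 1 ≤ q := by
    by_contra h
    have hq0 : q = 0 := Nat.lt_one_iff.mp (Nat.lt_of_not_le h)
    rw [hq0, Nat.zero_mul] at hqk
    omega
  rw [chunksB_spec k hk q s hqk]
  have hrowsne : (List.range q).map (fun j => (s.drop (j * k)).take k) ≠ [] := by
    simp
    omega
  have hrowslen : ∀ r ∈ (List.range q).map (fun j => (s.drop (j * k)).take k), r.length = k := by
    intro r hr
    rcases List.mem_map.mp hr with ⟨j, hj, rfl⟩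
    have hjq : j < q := List.mem_range.mp hj
    simp only [List.length_take, List.length_drop, hqk]
    have : k ≤ q * k - j * k := by
      have h1 : (j + 1) * k ≤ q * k := Nat.mul_le_mul_right k hjq
      rw [Nat.succ_mul] at h1
      omega
    omega
  rw [transpB_spec k _ hrowsne hrowslen]
  rw [List.map_map]
  apply List.map_congr_left
  intro i hi
  have hik : i < k := List.mem_range.mp hi
  simp only [Function.comp_apply]
  rw [List.map_map, List.map_map]
  apply List.map_congr_left
  intro j hj
  simp only [Function.comp_apply]
  rw [List.getElem?_take_of_lt hik, List.getElem?_drop]
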